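-- pv_equiv track=rewrite | github.com/highlaw00/BaekJoon-Studies | 프로그래머스/2/87390. n＾2 배열 자르기/n＾2 배열 자르기.py | solution
-- ===== SOURCE A (Python) =====
-- def get_number(i, j):
--     if (j >= i): return j+1
--     else: return i+1
--
-- def solution(n, left, right):
--     answer = []
--
--     left_i, left_j = left // n, left % n
--     right_i, right_j = right // n, right % n
--
-- #     # left_i번째 행 삽입
-- #     for i in range(left_j, n):
-- #         answer.append(get_number(left_i, i))
--
-- #     # left_i ~ right_i 사이 행 삽입
-- #     for i in range(left_i+1, right_i):
-- #         for j in range(n):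
-- #             answer.append(get_number(i, j))
--
-- #     # right_i번재 행 삽입
-- #     for i in range(right_j+1):
-- #         answer.append(get_number(right_i, i))
--
--     for i in range(left_i, right_i+1):
--         for j in range(n):
--             if i == left_i and j < left_j:
--                 continue
--             if i == right_i and j > right_j:
--                 continue
--             answer.append(get_number(i,j))
--
--     return answer
-- ===== SOURCE B (Python) =====
-- def solution(n, left, right):
--     return [max(k // n, k % n) + 1 for k in range(left, right + 1)]
-- ===== Notes on version B (the rewrite author's own statement) =====
-- stated objective: simpler
-- what changed: Replaces A's nested row/column loop with continue-guards (plus the get_number helper and four div/mod boundary variables) by one flat comprehension over the linear index k in range(left, right+1), recovering the cell value directly as max(k//n, k%n)+1.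
-- outside the precondition, e.g. on solution(-2, 0, 1): A returns [], B returns [1, 0]
import Mathlib
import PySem

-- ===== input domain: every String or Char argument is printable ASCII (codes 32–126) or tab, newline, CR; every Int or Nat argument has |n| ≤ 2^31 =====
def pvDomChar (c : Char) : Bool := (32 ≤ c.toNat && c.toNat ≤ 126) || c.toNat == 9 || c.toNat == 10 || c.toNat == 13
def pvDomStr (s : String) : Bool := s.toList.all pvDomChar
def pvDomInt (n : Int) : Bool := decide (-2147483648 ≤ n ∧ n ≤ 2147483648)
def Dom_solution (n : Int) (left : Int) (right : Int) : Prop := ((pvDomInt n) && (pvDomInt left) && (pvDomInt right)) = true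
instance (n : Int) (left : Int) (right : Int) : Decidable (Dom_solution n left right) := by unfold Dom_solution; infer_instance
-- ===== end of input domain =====

-- B replaces A's nested row/column loops with continue-guards by one flat map over the
-- linear index k ∈ [left, right], computing max(k//n, k%n)+1 directly (objective: simpler).
-- Pre_solution restricts to the problem's natural domain n ≥ 1: at n = 0 the Python A raises
-- ZeroDivisionError, and a negative board size n is outside the problem's domain.


-- ===== PORT A =====
def get_number (i : Int) (j : Int) : Int := if j ≥ i then j + 1 else i + 1

def solution (n : Int) (left : Int) (right : Int) : List Int :=
  let left_i := PySem.Int.floordiv left n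
  let left_j := PySem.Int.mod left n
  let right_i := PySem.Int.floordiv right n
  let right_j := PySem.Int.mod right n
  (PySem.List.pyRange left_i (right_i + 1) 1).foldl
    (fun answer i =>
      (PySem.List.pyRange 0 n 1).foldl
        (fun answer j =>
          if i = left_i ∧ j < left_j then answer
          else if i = right_i ∧ right_j < j then answer
          else answer ++ [get_number i j])
        answer)
    []

-- ===== PORT B =====
def solution_alt (n : Int) (left : Int) (right : Int) : List Int :=
  (PySem.List.pyRange left (right + 1) 1).map
    (fun k => max (PySem.Int.floordiv k n) (PySem.Int.mod k n) + 1)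

-- ===== PRECONDITION & SPEC =====
-- Pre_ restricts to the problem's natural domain n ≥ 1: at n = 0 A raises ZeroDivisionError,
-- and a negative board size n is outside the problem's domain (A's range(n) is then empty).
def Pre_solution (n : Int) (left : Int) (right : Int) : Prop := 1 ≤ n
instance (n : Int) (left : Int) (right : Int) : Decidable (Pre_solution n left right) := by unfold Pre_solution; infer_instance
def pvWitness_solution : Int × Int × Int := (3, 2, 5)
def Spec_solution (n : Int) (left : Int) (right : Int) (out : List Int) : Prop := out = solution_alt n left right
instance (n : Int) (left : Int) (right : Int) (out : List Int) : Decidable (Spec_solution n left right out) := by unfold Spec_solution; infer_instance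

-- ===== CLAIM (what is proved, stated in full; the proofs are below) =====
def Claim_equal_solution : Prop := ∀ (n : Int) (left : Int) (right : Int), Dom_solution n left right → Pre_solution n left right → Spec_solution n left right (solution n left right)

-- ===== LEMMAS AND PROOFS =====

-- the cell value B computes from the linear index
def cellVal (n : Int) (k : Int) : Int := max (PySem.Int.floordiv k n) (PySem.Int.mod k n) + 1

-- one row's contribution, written as B computes it
def rowSeg (n : Int) (left : Int) (right : Int) (i : Int) : List Int :=
  (PySem.List.pyRange (max left (i * n)) (min (right + 1) (i * n + n)) 1).map (cellVal n)

-- shifting an integer range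
lemma pyRange_shift (c : Int) : ∀ (d : Nat) (a b : Int), (b - a).toNat = d →
    PySem.List.pyRange (c + a) (c + b) 1 = (PySem.List.pyRange a b 1).map (fun j => c + j) := by
  intro d
  induction d with
  | zero =>
    intro a b hd
    rw [PySem.List.pyRange_one_eq_nil (by omega), PySem.List.pyRange_one_eq_nil (by omega)]
    rfl
  | succ e ih =>
    intro a b hd
    have hab : a < b := by omega
    rw [PySem.List.pyRange_one_cons hab, PySem.List.pyRange_one_cons (by omega : c + a < c + b)]
    have := ih (a + 1) b (by omega)
    rw [List.map_cons, show c + a + 1 = c + (a + 1) by ring, this]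

-- filtering a range by an interval condition
lemma filter_pyRange (lo hi : Int) : ∀ (d : Nat) (a b : Int), (b - a).toNat = d →
    (PySem.List.pyRange a b 1).filter (fun j => decide (lo ≤ j) && decide (j ≤ hi))
      = PySem.List.pyRange (max a lo) (min b (hi + 1)) 1 := by
  intro d
  induction d with
  | zero =>
    intro a b hd
    rw [PySem.List.pyRange_one_eq_nil (by omega), PySem.List.pyRange_one_eq_nil (by omega)]
    rfl
  | succ e ih =>
    intro a b hd
    have hab : a < b := by omega
    rw [PySem.List.pyRange_one_cons hab, List.filter_cons, ih (a + 1) b (by omega)]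
    by_cases h1 : lo ≤ a ∧ a ≤ hi
    · have : (decide (lo ≤ a) && decide (a ≤ hi)) = true := by simp [h1.1, h1.2]
      rw [if_pos this]
      rw [show max (a + 1) lo = max a lo + 1 by omega]
      rw [show max a lo = a by omega] at *
      rw [PySem.List.pyRange_one_cons (by omega : a < min b (hi + 1))]
    · have : (decide (lo ≤ a) && decide (a ≤ hi)) = false := by
        simp only [Bool.and_eq_false_iff, decide_eq_false_iff_not]; omega
      rw [if_neg (by simp [this])]
      by_cases h2 : a < lo
      · rw [show max (a + 1) lo = max a lo by omega]
      · -- then hi < a : both ranges empty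
        rw [PySem.List.pyRange_one_eq_nil (by omega), PySem.List.pyRange_one_eq_nil (by omega)]

-- the inner loop of A, from any accumulator, appends exactly rowSeg
lemma inner_loop_eq (n left right i : Int) (hn : 0 < n)
    (hlo : PySem.Int.floordiv left n ≤ i) (hhi : i ≤ PySem.Int.floordiv right n)
    (acc : List Int) :
    (PySem.List.pyRange 0 n 1).foldl
      (fun answer j =>
        if i = PySem.Int.floordiv left n ∧ j < PySem.Int.mod left n then answer
        else if i = PySem.Int.floordiv right n ∧ PySem.Int.mod right n < j then answer
        else answer ++ [get_number i j]) acc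
    = acc ++ rowSeg n left right i := by
  have hljn := PySem.Int.mod_lt left hn
  have hlj0 := PySem.Int.mod_nonneg left hn
  have hrjn := PySem.Int.mod_lt right hn
  have hrj0 := PySem.Int.mod_nonneg right hn
  have hleq := PySem.Int.floordiv_mul_add_mod left n
  have hreq := PySem.Int.floordiv_mul_add_mod right n
  set li := PySem.Int.floordiv left n with hli
  set lj := PySem.Int.mod left n with hlj
  set ri := PySem.Int.floordiv right n with hri
  set rj := PySem.Int.mod right n with hrj
  set lo := if i = li then lj else 0 with hlodef
  set hi := if i = ri then rj else n - 1 with hhidef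
  clear_value li lj ri rj lo hi
  -- rewrite the loop body into an append-if shape
  rw [PySem.List.foldl_congr_mem _ _
      (fun answer j => if ¬(i = li ∧ j < lj) ∧ ¬(i = ri ∧ rj < j) then answer ++ [get_number i j] else answer) _
      (by intro a j _; beta_reduce; split_ifs <;> first | rfl | tauto)]
  rw [PySem.List.foldl_append_ite (p := fun j => ¬(i = li ∧ j < lj) ∧ ¬(i = ri ∧ rj < j))]
  rw [List.filter_congr (q := fun j => decide (lo ≤ j) && decide (j ≤ hi))
      (by
        intro j hj
        rw [PySem.List.mem_pyRange_one] at hj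
        beta_reduce
        rw [← Bool.decide_and]
        apply decide_eq_decide.mpr
        simp only [hlodef, hhidef]
        split_ifs <;> omega)]
  rw [filter_pyRange lo hi n.toNat 0 n (by omega)]
  have hlo0 : max 0 lo = lo := by simp only [hlodef]; split_ifs <;> omega
  have hhin : min n (hi + 1) = hi + 1 := by simp only [hhidef]; split_ifs <;> omega
  rw [hlo0, hhin]
  -- identify the window [i*n+lo, i*n+hi+1) with rowSeg's bounds
  have hwin1 : max left (i * n) = i * n + lo := by
    rcases eq_or_ne i li with hil | hil
    · rw [hlodef, if_pos hil, hil]; omega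
    · rw [hlodef, if_neg hil]
      have h1 : (li + 1) * n ≤ i * n := mul_le_mul_of_nonneg_right (by omega) hn.le
      rw [add_mul, one_mul] at h1
      omega
  have hwin2 : min (right + 1) (i * n + n) = i * n + (hi + 1) := by
    rcases eq_or_ne i ri with hir | hir
    · rw [hhidef, if_pos hir, hir]; omega
    · rw [hhidef, if_neg hir]
      have h2 : (i + 1) * n ≤ ri * n := mul_le_mul_of_nonneg_right (by omega) hn.le
      rw [add_mul, one_mul] at h2
      omega
  rw [rowSeg, hwin1, hwin2]
  rw [pyRange_shift (i * n) (hi + 1 - lo).toNat lo (hi + 1) (by omega)]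
  rw [List.map_map]
  congr 1
  apply List.map_congr_left
  intro j hj
  rw [PySem.List.mem_pyRange_one] at hj
  have hj0 : 0 ≤ j := by simp only [hlodef] at hj; split_ifs at hj <;> omega
  have hjn : j < n := by simp only [hhidef] at hj; split_ifs at hj <;> omega
  have hdiv : PySem.Int.floordiv (i * n + j) n = i := by
    rw [PySem.Int.floordiv_eq_iff_of_pos hn]
    constructor
    · omega
    · rw [add_mul, one_mul]; omega
  have hmod : PySem.Int.mod (i * n + j) n = j := by
    have := PySem.Int.floordiv_mul_add_mod (i * n + j) n
    rw [hdiv] at this; omega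
  simp only [Function.comp, cellVal, get_number, hdiv, hmod]
  split_ifs <;> omega

-- concatenating the row segments gives B's flat map
lemma split_rows (n : Int) (hn : 0 < n) : ∀ (d : Nat) (left right : Int),
    (PySem.Int.floordiv right n - PySem.Int.floordiv left n).toNat ≤ d →
    (PySem.List.pyRange (PySem.Int.floordiv left n) (PySem.Int.floordiv right n + 1) 1).flatMap
      (rowSeg n left right)
    = (PySem.List.pyRange left (right + 1) 1).map (cellVal n) := by
  intro d
  induction d with
  | zero =>
    intro left right hd
    have hljn := PySem.Int.mod_lt left hn
    have hlj0 := PySem.Int.mod_nonneg left hn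
    have hrjn := PySem.Int.mod_lt right hn
    have hrj0 := PySem.Int.mod_nonneg right hn
    have hleq := PySem.Int.floordiv_mul_add_mod left n
    have hreq := PySem.Int.floordiv_mul_add_mod right n
    set li := PySem.Int.floordiv left n with hli
    set lj := PySem.Int.mod left n with hlj
    set ri := PySem.Int.floordiv right n with hri
    set rj := PySem.Int.mod right n with hrj
    rcases eq_or_lt_of_le (show ri ≤ li by omega) with heq | hlt
    · -- exactly one row: it is the whole window
      rw [← heq, PySem.List.pyRange_one_cons (by omega : ri < ri + 1),
        PySem.List.pyRange_one_eq_nil (by omega : ri + 1 ≤ ri + 1)]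
      rw [List.flatMap_cons, List.flatMap_nil, List.append_nil, rowSeg]
      have h1 : max left (ri * n) = left := by rw [heq]; omega
      have h2 : min (right + 1) (ri * n + n) = right + 1 := by omega
      rw [h1, h2]
    · -- no row at all: right < left, both sides empty
      have hp : (ri + 1) * n ≤ li * n := mul_le_mul_of_nonneg_right (by omega) hn.le
      rw [add_mul, one_mul] at hp
      rw [PySem.List.pyRange_one_eq_nil (by omega : ri + 1 ≤ li),
        PySem.List.pyRange_one_eq_nil (by omega : right + 1 ≤ left)]
      rfl
  | succ e ih =>
    intro left right hd
    have hljn := PySem.Int.mod_lt left hn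
    have hlj0 := PySem.Int.mod_nonneg left hn
    have hrjn := PySem.Int.mod_lt right hn
    have hrj0 := PySem.Int.mod_nonneg right hn
    have hleq := PySem.Int.floordiv_mul_add_mod left n
    have hreq := PySem.Int.floordiv_mul_add_mod right n
    set li := PySem.Int.floordiv left n with hli
    set lj := PySem.Int.mod left n with hlj
    set ri := PySem.Int.floordiv right n with hri
    set rj := PySem.Int.mod right n with hrj
    by_cases hle : (ri - li).toNat ≤ e
    · exact ih left right hle
    · have hlr : li < ri := by omega
      -- peel the first row; the rest restarts at l' = (li+1)*n
      have hp1 : (li + 1) * n ≤ ri * n := mul_le_mul_of_nonneg_right (by omega) hn.le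
      rw [add_mul, one_mul] at hp1
      have hl' : PySem.Int.floordiv ((li + 1) * n) n = li + 1 := by
        rw [PySem.Int.floordiv_eq_iff_of_pos hn]
        exact ⟨le_rfl, by nlinarith⟩
      rw [PySem.List.pyRange_one_cons (by omega : li < ri + 1), List.flatMap_cons]
      have hrow : rowSeg n left right li
          = (PySem.List.pyRange left ((li + 1) * n) 1).map (cellVal n) := by
        rw [rowSeg]
        have h1 : max left (li * n) = left := by omega
        have h2 : min (right + 1) (li * n + n) = (li + 1) * n := by
          rw [add_mul, one_mul]; omega
        rw [h1, h2]
      have hcong : ∀ i ∈ PySem.List.pyRange (li + 1) (ri + 1) 1,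
          rowSeg n left right i = rowSeg n ((li + 1) * n) right i := by
        intro i hi
        rw [PySem.List.mem_pyRange_one] at hi
        have hpi : (li + 1) * n ≤ i * n := mul_le_mul_of_nonneg_right (by omega) hn.le
        rw [rowSeg, rowSeg]
        have h1 : max left (i * n) = max ((li + 1) * n) (i * n) := by
          rw [add_mul, one_mul] at hpi ⊢; omega
        rw [h1]
      rw [List.flatMap_congr hcong]
      have hIH := ih ((li + 1) * n) right (by rw [hl', ← hri]; omega)
      rw [hl'] at hIH
      rw [hIH, hrow]
      rw [PySem.List.pyRange_one_append left ((li + 1) * n) (right + 1)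
        (by rw [add_mul, one_mul]; omega) (by rw [add_mul, one_mul]; omega)]
      rw [List.map_append]

-- ===== VERDICT (by name: the statement is the Claim_ definition above) =====
theorem solution_spec : Claim_equal_solution := by
  intro n left right _hdom hpre
  have hn : 0 < n := hpre
  unfold Spec_solution solution solution_alt
  simp only []
  rw [PySem.List.foldl_congr_mem _ _ (fun answer i => answer ++ rowSeg n left right i) _
    (by
      intro acc i hi
      rw [PySem.List.mem_pyRange_one] at hi
      exact inner_loop_eq n left right i hn hi.1 (by omega) acc)]
  rw [PySem.List.foldl_append_eq_flatMap]
  rw [split_rows n hn (PySem.Int.floordiv right n - PySem.Int.floordiv left n).toNat left right le_rfl]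
  rfl
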